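-- pv_equiv track=rewrite | github.com/dnxnf/Meachine-Learning-New | pythonProblem/40FindMaxMine.py | result
-- ===== SOURCE A (Python) =====
-- directs = ((1, 0), (-1, 0), (0, -1), (0, 1))
--
-- def dfs(i, j, matrix, row, col):
--     # 注意啊，这里matrix是重新传参一份了，跟原来的matrix没有关系了哈。
--     total = matrix[i][j]
--     matrix[i][j] = 0  # 该矿被挖了，所以置为0
--     # 把他加入栈
--     st = [[i, j]]
--     while len(st) > 0:
--         x, y = st.pop()
--         for dirx, diry in directs:
--             newX = x + dirx
--             newY = y + diry
--             # 判断边界条件是否越界, 并且要有矿啊(>0)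
--             if row > newX >= 0 and col > newY >= 0 and matrix[newX][newY] > 0:
--                 total += matrix[newX][newY]
--                 matrix[newX][newY] = 0  # 把矿挖了，要变成空地啊
--                 st.append([newX, newY])
--     return total
--
-- def result(matrix):
--     row = len(matrix)
--     if row == 0:
--         return 0
--     col = len(matrix[0])
--     ans = 0
--     # 遍历矩阵。
--     for i in range(row):
--         for j in range(col):
--             # 如果存在矿,开始深搜
--             if matrix[i][j] > 0:  # 存在矿。
--                 ans = max(ans, dfs(i, j, matrix, row, col))
--     return ans
-- ===== SOURCE B (Python) =====
-- directs = ((1, 0), (-1, 0), (0, -1), (0, 1))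
--
--
-- def _component(matrix, i, j, row, col):
--     # All cells of the positive 4-connected component containing (i, j),
--     # collected by level-set (frontier) expansion; does not modify matrix.
--     comp = {(i, j)}
--     frontier = {(i, j)}
--     while frontier:
--         frontier = {(x + dx, y + dy)
--                     for (x, y) in frontier for (dx, dy) in directs
--                     if 0 <= x + dx < row and 0 <= y + dy < col
--                     and matrix[x + dx][y + dy] > 0
--                     and (x + dx, y + dy) not in comp}
--         comp |= frontier
--     return comp
--
--
-- def result(matrix):
--     row = len(matrix)
--     if row == 0:
--         return 0
--     col = len(matrix[0])
--     ans = 0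
--     for i in range(row):
--         for j in range(col):
--             if matrix[i][j] > 0:
--                 comp = _component(matrix, i, j, row, col)
--                 total = sum(matrix[x][y] for x, y in comp)
--                 for x, y in comp:
--                     matrix[x][y] = 0
--                 ans = max(ans, total)
--     return ans
-- ===== Notes on version B (the rewrite author's own statement) =====
-- stated objective: alternative
-- what changed: Replaces the per-cell explicit-stack DFS that pops one cell at a time and sums/zeroes its neighbours as it goes with a level-set (frontier) BFS that first collects the whole positive component as a set, then sums it and zeroes it in bulk.
import Mathlib
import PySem

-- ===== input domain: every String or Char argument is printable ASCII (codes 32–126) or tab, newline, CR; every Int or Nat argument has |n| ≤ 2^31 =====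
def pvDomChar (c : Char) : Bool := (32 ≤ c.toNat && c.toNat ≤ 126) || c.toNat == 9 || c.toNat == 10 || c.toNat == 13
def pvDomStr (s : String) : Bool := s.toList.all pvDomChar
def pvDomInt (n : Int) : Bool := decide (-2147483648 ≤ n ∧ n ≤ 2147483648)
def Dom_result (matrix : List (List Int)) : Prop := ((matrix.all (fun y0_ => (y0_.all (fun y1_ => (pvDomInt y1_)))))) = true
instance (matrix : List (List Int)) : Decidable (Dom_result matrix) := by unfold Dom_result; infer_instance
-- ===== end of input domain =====

-- B replaces A's per-cell explicit-stack DFS (pop a cell, sum and zero its positive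
-- neighbours, push them) by a level-set (frontier) BFS that first collects the whole
-- positive component as a set and only then sums it and zeroes it in bulk.
-- Both Pythons mutate `matrix` in place identically (every positive cell ends up 0);
-- the equivalence proved here is about the return value.

-- ===== PORT A =====

-- matrix[x][y]; exact for the ports' reads: every read is guarded by 0 ≤ index,
-- and inside Pre_result it is in range (default 0 is never returned there).
def pvGet (m : List (List Int)) (x y : Int) : Int :=
  (PySem.List.pyGet? ((PySem.List.pyGet? m x).getD []) y).getD 0

-- matrix[x][y] = 0; exact: every write the ports perform has 0 ≤ x, 0 ≤ y and,
-- inside Pre_result, both indices in range (so toNat never clamps a negative).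
def pvSet0 (m : List (List Int)) (x y : Int) : List (List Int) :=
  m.modify x.toNat (fun row => row.set y.toNat 0)

def pvDirects : List (Int × Int) := [(1, 0), (-1, 0), (0, -1), (0, 1)]

-- fuel bound (totality device only): total number of entries of the matrix
def pvCells (m : List (List Int)) : Nat := (m.map List.length).sum

-- the `while len(st) > 0` loop of A's dfs; stack top = list head
def dfsALoop (fuel : Nat) (m : List (List Int)) (st : List (Int × Int))
    (total : Int) (row col : Int) : Int × List (List Int) :=
  match fuel, st with
  | 0, _ => (total, m)
  | _ + 1, [] => (total, m)
  | f + 1, (x, y) :: rest =>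
    let s := pvDirects.foldl
      (fun (acc : List (List Int) × List (Int × Int) × Int) d =>
        let nx := x + d.1
        let ny := y + d.2
        if row > nx ∧ nx ≥ 0 ∧ col > ny ∧ ny ≥ 0 ∧ pvGet acc.1 nx ny > 0 then
          (pvSet0 acc.1 nx ny, (nx, ny) :: acc.2.1, acc.2.2 + pvGet acc.1 nx ny)
        else acc)
      (m, rest, total)
    dfsALoop f s.1 s.2.1 s.2.2 row col

-- A's dfs(i, j, matrix, row, col): returns (total, mutated matrix)
def dfsA (m : List (List Int)) (i j row col : Int) : Int × List (List Int) :=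
  dfsALoop (2 * pvCells m + 2) (pvSet0 m i j) [(i, j)] (pvGet m i j) row col

def result (matrix : List (List Int)) : Int :=
  let row : Int := matrix.length
  if row = 0 then 0
  else
    let col : Int := ((PySem.List.pyGet? matrix 0).getD []).length
    let fin := (PySem.List.pyRange 0 row 1).foldl
      (fun (acc : Int × List (List Int)) i =>
        (PySem.List.pyRange 0 col 1).foldl
          (fun (acc : Int × List (List Int)) j =>
            if pvGet acc.2 i j > 0 then
              let r := dfsA acc.2 i j row col
              (max acc.1 r.1, r.2)
            else acc)
          acc)
      (0, matrix)
    fin.1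

-- ===== PORT B =====

-- the `while frontier` loop of B's _component
def compLoop (fuel : Nat) (m : List (List Int)) (row col : Int)
    (comp frontier : PySem.Set (Int × Int)) : PySem.Set (Int × Int) :=
  match fuel with
  | 0 => comp
  | f + 1 =>
    if frontier.isEmpty then comp
    else
      let frontier' := PySem.Set.ofList (frontier.flatMap (fun p =>
        pvDirects.filterMap (fun d =>
          let nx := p.1 + d.1
          let ny := p.2 + d.2
          if 0 ≤ nx ∧ nx < row ∧ 0 ≤ ny ∧ ny < col ∧ pvGet m nx ny > 0 ∧
              (nx, ny) ∉ comp then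
            some (nx, ny)
          else none)))
      let comp' := frontier'.foldl (fun c p => PySem.Set.add c p) comp
      compLoop f m row col comp' frontier'

-- B's _component(matrix, i, j, row, col)
def componentB (m : List (List Int)) (i j row col : Int) : PySem.Set (Int × Int) :=
  compLoop (pvCells m + 2) m row col (PySem.Set.ofList [(i, j)]) (PySem.Set.ofList [(i, j)])

def result_alt (matrix : List (List Int)) : Int :=
  let row : Int := matrix.length
  if row = 0 then 0
  else
    let col : Int := ((PySem.List.pyGet? matrix 0).getD []).length
    let fin := (PySem.List.pyRange 0 row 1).foldl
      (fun (acc : Int × List (List Int)) i =>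
        (PySem.List.pyRange 0 col 1).foldl
          (fun (acc : Int × List (List Int)) j =>
            if pvGet acc.2 i j > 0 then
              let comp := componentB acc.2 i j row col
              let total := (comp.map (fun p => pvGet acc.2 p.1 p.2)).sum
              (max acc.1 total, comp.foldl (fun m p => pvSet0 m p.1 p.2) acc.2)
            else acc)
          acc)
      (0, matrix)
    fin.1

-- ===== PRECONDITION & SPEC =====
-- Pre_ excludes exactly the ragged matrices with a row shorter than the first row,
-- on which A raises IndexError (so A never returns there).
def Pre_result (matrix : List (List Int)) : Prop :=
  ∀ row ∈ matrix, (matrix.headD []).length ≤ row.length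
instance (matrix : List (List Int)) : Decidable (Pre_result matrix) := by
  unfold Pre_result; infer_instance

def pvWitness_result : List (List Int) := [[1, -2], [0, 3]]

def Spec_result (matrix : List (List Int)) (out : Int) : Prop := out = result_alt matrix
instance (matrix : List (List Int)) (out : Int) : Decidable (Spec_result matrix out) := by
  unfold Spec_result; infer_instance

-- ===== CLAIM (what is proved, stated in full; the proofs are below) =====
def Claim_equal_result : Prop :=
  ∀ (matrix : List (List Int)), Dom_result matrix → Pre_result matrix →
    Spec_result matrix (result matrix)

-- ===== LEMMAS AND PROOFS =====

-- ---- Nat-indexed views of pvGet / pvSet0 ----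

def ngN (m : List (List Int)) (a b : Nat) : Int := (m[a]?.getD [])[b]?.getD 0

def szN (m : List (List Int)) (a b : Nat) : List (List Int) :=
  m.modify a (fun r => r.set b 0)

theorem pvGet_eq (m : List (List Int)) {x y : Int} (hx : 0 ≤ x) (hy : 0 ≤ y) :
    pvGet m x y = ngN m x.toNat y.toNat := by
  simp [pvGet, ngN, PySem.List.pyGet?_of_nonneg _ hx, PySem.List.pyGet?_of_nonneg _ hy]

theorem pvSet0_eq (m : List (List Int)) (x y : Int) :
    pvSet0 m x y = szN m x.toNat y.toNat := rfl

-- ---- row-level facts about List.set ----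

theorem sum_set0 (r : List Int) (j : Nat) : (r.set j 0).sum = r.sum - r[j]?.getD 0 := by
  induction r generalizing j with
  | nil => simp
  | cons x t ih =>
    cases j with
    | zero => simp
    | succ n => simp [ih]; ring

theorem countP_set0_le (r : List Int) (j : Nat) :
    (r.set j 0).countP (fun v => decide (0 < v)) ≤ r.countP (fun v => decide (0 < v)) := by
  induction r generalizing j with
  | nil => simp
  | cons x t ih =>
    cases j with
    | zero => by_cases h : (0:Int) < x <;> simp [h]
    | succ n => simp only [List.set_cons_succ, List.countP_cons]; exact Nat.add_le_add (ih n) le_rfl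

theorem countP_set0 (r : List Int) (j : Nat) (h : 0 < r[j]?.getD 0) :
    (r.set j 0).countP (fun v => decide (0 < v)) + 1 = r.countP (fun v => decide (0 < v)) := by
  induction r generalizing j with
  | nil => simp at h
  | cons x t ih =>
    cases j with
    | zero => simp at h; simp [h]
    | succ n =>
      simp at h
      simp only [List.set_cons_succ, List.countP_cons]
      have := ih n h
      omega

-- ---- matrix-level facts ----

def sumA (m : List (List Int)) : Int := (m.map List.sum).sum

def posN (m : List (List Int)) : Nat :=
  (m.map (fun r => r.countP (fun v => decide (0 < v)))).sum


theorem szN_cons_zero (r : List Int) (t : List (List Int)) (b : Nat) :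
    szN (r :: t) 0 b = r.set b 0 :: t := by simp [szN, List.modify]

theorem szN_cons_succ (r : List Int) (t : List (List Int)) (n b : Nat) :
    szN (r :: t) (n + 1) b = r :: szN t n b := by simp [szN, List.modify]

theorem ngN_cons_zero (r : List Int) (t : List (List Int)) (b : Nat) :
    ngN (r :: t) 0 b = r[b]?.getD 0 := by simp [ngN]

theorem ngN_cons_succ (r : List Int) (t : List (List Int)) (n b : Nat) :
    ngN (r :: t) (n + 1) b = ngN t n b := by simp [ngN]

theorem sumA_cons (r : List Int) (t : List (List Int)) :
    sumA (r :: t) = r.sum + sumA t := by simp [sumA]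

theorem posN_cons (r : List Int) (t : List (List Int)) :
    posN (r :: t) = r.countP (fun v => decide (0 < v)) + posN t := by simp [posN]

theorem ngN_szN (m : List (List Int)) (a b : Nat) (h : 0 < ngN m a b) (a' b' : Nat) :
    ngN (szN m a b) a' b' = if (a', b') = (a, b) then 0 else ngN m a' b' := by
  induction m generalizing a a' with
  | nil => simp [ngN] at h
  | cons r t ih =>
    cases a with
    | zero =>
      rw [ngN_cons_zero] at h
      have hblt : b < r.length := by
        by_contra hc
        rw [List.getElem?_eq_none (by omega)] at h; simp at h
      cases a' with
      | zero =>
        rw [szN_cons_zero, ngN_cons_zero, ngN_cons_zero]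
        by_cases hbb : b' = b
        · subst hbb; simp [hblt]
        · rw [List.getElem?_set, if_neg (fun hc => hbb hc.symm),
            if_neg (by simp [Prod.ext_iff, hbb])]
      | succ n' =>
        rw [szN_cons_zero, ngN_cons_succ, ngN_cons_succ,
          if_neg (by simp [Prod.ext_iff])]
    | succ n =>
      rw [ngN_cons_succ] at h
      cases a' with
      | zero =>
        rw [szN_cons_succ, ngN_cons_zero, ngN_cons_zero,
          if_neg (by simp [Prod.ext_iff])]
      | succ n' =>
        rw [szN_cons_succ, ngN_cons_succ, ngN_cons_succ, ih n h n']
        by_cases hp : (n', b') = (n, b)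
        · rw [if_pos hp, if_pos (by simp [Prod.ext_iff] at hp ⊢; omega)]
        · rw [if_neg hp, if_neg (by simp [Prod.ext_iff] at hp ⊢; omega)]

theorem szN_comm (m : List (List Int)) (a b a' b' : Nat) :
    szN (szN m a b) a' b' = szN (szN m a' b') a b := by
  induction m generalizing a a' with
  | nil => simp [szN]
  | cons r t ih =>
    cases a with
    | zero =>
      cases a' with
      | zero =>
        rw [szN_cons_zero, szN_cons_zero, szN_cons_zero, szN_cons_zero]
        by_cases hbb : b = b'
        · subst hbb; rfl
        · rw [List.set_comm _ _ hbb]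
      | succ n' => rw [szN_cons_zero, szN_cons_succ, szN_cons_succ, szN_cons_zero]
    | succ n =>
      cases a' with
      | zero => rw [szN_cons_succ, szN_cons_zero, szN_cons_zero, szN_cons_succ]
      | succ n' => rw [szN_cons_succ, szN_cons_succ, szN_cons_succ, szN_cons_succ, ih n n']

theorem sumA_szN (m : List (List Int)) (a b : Nat) :
    sumA (szN m a b) = sumA m - ngN m a b := by
  induction m generalizing a with
  | nil => simp [sumA, szN, ngN]
  | cons r t ih =>
    cases a with
    | zero => rw [szN_cons_zero, sumA_cons, sumA_cons, ngN_cons_zero, sum_set0]; ring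
    | succ n => rw [szN_cons_succ, sumA_cons, sumA_cons, ngN_cons_succ, ih n]; ring

theorem posN_szN_le (m : List (List Int)) (a b : Nat) : posN (szN m a b) ≤ posN m := by
  induction m generalizing a with
  | nil => simp [posN, szN]
  | cons r t ih =>
    cases a with
    | zero =>
      rw [szN_cons_zero, posN_cons, posN_cons]
      exact Nat.add_le_add (countP_set0_le r b) le_rfl
    | succ n =>
      rw [szN_cons_succ, posN_cons, posN_cons]
      exact Nat.add_le_add le_rfl (ih n)

theorem posN_szN (m : List (List Int)) (a b : Nat) (h : 0 < ngN m a b) :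
    posN (szN m a b) + 1 = posN m := by
  induction m generalizing a with
  | nil => simp [ngN] at h
  | cons r t ih =>
    cases a with
    | zero =>
      rw [ngN_cons_zero] at h
      rw [szN_cons_zero, posN_cons, posN_cons]
      have := countP_set0 r b h
      omega
    | succ n =>
      rw [ngN_cons_succ] at h
      rw [szN_cons_succ, posN_cons, posN_cons]
      have := ih n h
      omega

theorem posN_le_cells (m : List (List Int)) : posN m ≤ pvCells m := by
  induction m with
  | nil => simp [posN, pvCells]
  | cons r t ih =>
    have := List.countP_le_length (p := fun v : Int => decide (0 < v)) (l := r)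
    simp [posN, pvCells] at *
    omega

-- ---- Int-coordinate wrappers ----

theorem pvSet0_comm (m : List (List Int)) (x y u v : Int) :
    pvSet0 (pvSet0 m x y) u v = pvSet0 (pvSet0 m u v) x y := by
  rw [pvSet0_eq, pvSet0_eq, pvSet0_eq, pvSet0_eq, szN_comm]

theorem pvGet_pvSet0 (m : List (List Int)) {x y a b : Int}
    (hx : 0 ≤ x) (hy : 0 ≤ y) (ha : 0 ≤ a) (hb : 0 ≤ b) (h : 0 < pvGet m x y) :
    pvGet (pvSet0 m x y) a b = if (a, b) = (x, y) then 0 else pvGet m a b := by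
  rw [pvGet_eq m hx hy] at h
  rw [pvSet0_eq, pvGet_eq _ ha hb, ngN_szN _ _ _ h]
  by_cases hp : (a, b) = (x, y)
  · rw [if_pos hp, if_pos (by simp [Prod.ext_iff] at hp ⊢; omega)]
  · rw [if_neg (by simp [Prod.ext_iff] at hp ⊢; omega), if_neg hp, pvGet_eq m ha hb]

theorem sumA_pvSet0 (m : List (List Int)) {x y : Int} (hx : 0 ≤ x) (hy : 0 ≤ y) :
    sumA (pvSet0 m x y) = sumA m - pvGet m x y := by
  rw [pvSet0_eq, sumA_szN, pvGet_eq m hx hy]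

theorem posN_pvSet0_le (m : List (List Int)) (x y : Int) :
    posN (pvSet0 m x y) ≤ posN m := by
  rw [pvSet0_eq]; exact posN_szN_le m _ _

theorem posN_pvSet0 (m : List (List Int)) {x y : Int} (hx : 0 ≤ x) (hy : 0 ≤ y)
    (h : 0 < pvGet m x y) : posN (pvSet0 m x y) + 1 = posN m := by
  rw [pvGet_eq m hx hy] at h
  rw [pvSet0_eq, posN_szN _ _ _ h]

-- ---- zeroing a list of cells ----

def zeroL (V : List (Int × Int)) (m : List (List Int)) : List (List Int) :=
  V.foldl (fun m p => pvSet0 m p.1 p.2) m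

def OkCells (m : List (List Int)) (V : List (Int × Int)) : Prop :=
  ∀ p ∈ V, 0 ≤ p.1 ∧ 0 ≤ p.2 ∧ 0 < pvGet m p.1 p.2

theorem zeroL_nil (m : List (List Int)) : zeroL [] m = m := rfl

theorem zeroL_cons (p : Int × Int) (V : List (Int × Int)) (m : List (List Int)) :
    zeroL (p :: V) m = zeroL V (pvSet0 m p.1 p.2) := rfl

theorem zeroL_append (V W : List (Int × Int)) (m : List (List Int)) :
    zeroL (V ++ W) m = zeroL W (zeroL V m) := List.foldl_append ..

theorem okCells_tail {m : List (List Int)} {p : Int × Int} {V : List (Int × Int)}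
    (hnd : (p :: V).Nodup) (hok : OkCells m (p :: V)) :
    OkCells (pvSet0 m p.1 p.2) V := by
  intro q hq
  obtain ⟨hq1, hq2, hq3⟩ := hok q (List.mem_cons_of_mem _ hq)
  obtain ⟨hp1, hp2, hp3⟩ := hok p List.mem_cons_self
  refine ⟨hq1, hq2, ?_⟩
  rw [pvGet_pvSet0 m hp1 hp2 hq1 hq2 hp3,
    if_neg (by
        intro hqp
        have heq : q = p := Prod.ext (congrArg Prod.fst hqp) (congrArg Prod.snd hqp)
        exact (List.nodup_cons.mp hnd).1 (heq ▸ hq))]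
  exact hq3

theorem pvGet_zeroL (m : List (List Int)) (V : List (Int × Int)) (hnd : V.Nodup)
    (hok : OkCells m V) {a b : Int} (ha : 0 ≤ a) (hb : 0 ≤ b) :
    pvGet (zeroL V m) a b = if (a, b) ∈ V then 0 else pvGet m a b := by
  induction V generalizing m with
  | nil => simp [zeroL]
  | cons p V ih =>
    obtain ⟨hp1, hp2, hp3⟩ := hok p List.mem_cons_self
    rw [zeroL_cons, ih _ (List.nodup_cons.mp hnd).2 (okCells_tail hnd hok),
      pvGet_pvSet0 m hp1 hp2 ha hb hp3]
    by_cases h1 : (a, b) ∈ V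
    · simp [h1]
    · by_cases h2 : (a, b) = p <;> simp [h1, h2]

theorem sumA_zeroL (m : List (List Int)) (V : List (Int × Int)) (hnd : V.Nodup)
    (hok : OkCells m V) :
    sumA (zeroL V m) = sumA m - (V.map (fun p => pvGet m p.1 p.2)).sum := by
  induction V generalizing m with
  | nil => simp [zeroL]
  | cons p V ih =>
    obtain ⟨hp1, hp2, hp3⟩ := hok p List.mem_cons_self
    rw [zeroL_cons, ih _ (List.nodup_cons.mp hnd).2 (okCells_tail hnd hok),
      sumA_pvSet0 m hp1 hp2, List.map_cons, List.sum_cons]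
    have hmap : ∀ q ∈ V, pvGet (pvSet0 m p.1 p.2) q.1 q.2 = pvGet m q.1 q.2 := by
      intro q hq
      obtain ⟨hq1, hq2, _⟩ := hok q (List.mem_cons_of_mem _ hq)
      rw [pvGet_pvSet0 m hp1 hp2 hq1 hq2 hp3,
        if_neg (by
        intro hqp
        have heq : q = p := Prod.ext (congrArg Prod.fst hqp) (congrArg Prod.snd hqp)
        exact (List.nodup_cons.mp hnd).1 (heq ▸ hq))]
    rw [List.map_congr_left hmap]
    ring

theorem posN_zeroL (m : List (List Int)) (V : List (Int × Int)) (hnd : V.Nodup)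
    (hok : OkCells m V) : posN (zeroL V m) + V.length = posN m := by
  induction V generalizing m with
  | nil => simp [zeroL]
  | cons p V ih =>
    obtain ⟨hp1, hp2, hp3⟩ := hok p List.mem_cons_self
    have h1 := ih _ (List.nodup_cons.mp hnd).2 (okCells_tail hnd hok)
    have h2 := posN_pvSet0 m hp1 hp2 hp3
    rw [zeroL_cons]
    simp only [List.length_cons]
    omega

theorem length_le_posN (m : List (List Int)) (V : List (Int × Int)) (hnd : V.Nodup)
    (hok : OkCells m V) : V.length ≤ posN m := by
  have := posN_zeroL m V hnd hok
  omega

theorem zeroL_perm {V W : List (Int × Int)} (h : V.Perm W) (m : List (List Int)) :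
    zeroL V m = zeroL W m := by
  induction h generalizing m with
  | nil => rfl
  | cons x _ ih => rw [zeroL_cons, zeroL_cons, ih]
  | swap x y l => rw [zeroL_cons, zeroL_cons, zeroL_cons, zeroL_cons, pvSet0_comm]
  | trans _ _ ih1 ih2 => rw [ih1, ih2]

-- ---- positivity and reachability ----

def posC (m : List (List Int)) (row col : Int) (p : Int × Int) : Prop :=
  row > p.1 ∧ p.1 ≥ 0 ∧ col > p.2 ∧ p.2 ≥ 0 ∧ pvGet m p.1 p.2 > 0

inductive ReachC (m : List (List Int)) (row col : Int) (s : Int × Int) : Int × Int → Prop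
  | refl : ReachC m row col s s
  | step {p : Int × Int} (d : Int × Int) : ReachC m row col s p → d ∈ pvDirects →
      posC m row col (p.1 + d.1, p.2 + d.2) → ReachC m row col s (p.1 + d.1, p.2 + d.2)


theorem reach_sub {m : List (List Int)} {row col : Int} {s : Int × Int}
    (W : List (Int × Int)) (hsW : s ∈ W)
    (hcl : ∀ p ∈ W, ∀ d ∈ pvDirects, posC m row col (p.1 + d.1, p.2 + d.2) →
      (p.1 + d.1, p.2 + d.2) ∈ W) :
    ∀ p, ReachC m row col s p → p ∈ W := by
  intro p h
  induction h with
  | refl => exact hsW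
  | step d hr hd hp ih => exact hcl _ ih d hd hp


theorem okCells_of_pos {m : List (List Int)} {row col : Int} {V : List (Int × Int)}
    (h : ∀ p ∈ V, posC m row col p) : OkCells m V := by
  intro p hp
  obtain ⟨h1, h2, h3, h4, h5⟩ := h p hp
  exact ⟨h2, h4, h5⟩

-- ---- A side: the stack loop ----

def stepA (row col x y : Int) (acc : List (List Int) × List (Int × Int) × Int)
    (d : Int × Int) : List (List Int) × List (Int × Int) × Int :=
  let nx := x + d.1
  let ny := y + d.2
  if row > nx ∧ nx ≥ 0 ∧ col > ny ∧ ny ≥ 0 ∧ pvGet acc.1 nx ny > 0 then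
    (pvSet0 acc.1 nx ny, (nx, ny) :: acc.2.1, acc.2.2 + pvGet acc.1 nx ny)
  else acc

theorem dfsALoop_cons (f : Nat) (m : List (List Int)) (x y : Int)
    (rest : List (Int × Int)) (t row col : Int) :
    dfsALoop (f + 1) m ((x, y) :: rest) t row col =
      (fun s => dfsALoop f s.1 s.2.1 s.2.2 row col)
        (pvDirects.foldl (stepA row col x y) (m, rest, t)) := rfl

theorem expandA_spec (m0 : List (List Int)) (r c : Int) (s : Int × Int)
    (x y : Int) :
    ∀ (D : List (Int × Int)), (∀ d ∈ D, d ∈ pvDirects) →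
    ∀ (V st : List (Int × Int)) (t : Int),
    V.Nodup →
    (∀ p ∈ V, posC m0 r c p ∧ ReachC m0 r c s p) →
    (x, y) ∈ V →
    ∃ ns : List (Int × Int),
      D.foldl (stepA r c x y) (zeroL V m0, st, t)
        = (zeroL (V ++ ns) m0, ns.reverse ++ st,
            t + (ns.map (fun p => pvGet m0 p.1 p.2)).sum) ∧
      (V ++ ns).Nodup ∧
      (∀ p ∈ ns, posC m0 r c p ∧ ReachC m0 r c s p) ∧
      (∀ p, p ∈ V ++ ns ↔ p ∈ V ∨ ∃ d ∈ D, p = (x + d.1, y + d.2) ∧ posC m0 r c p) := by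
  intro D
  induction D with
  | nil =>
    intro _ V st t hnd hV _
    exact ⟨[], by simp, by simpa using hnd, by simp, by simp⟩
  | cons d D' ih =>
    intro hD V st t hnd hV hx0
    have hok : OkCells m0 V := okCells_of_pos (fun p hp => (hV p hp).1)
    have hget := fun (ha : (0:Int) ≤ x + d.1) (hb : (0:Int) ≤ y + d.2) =>
      pvGet_zeroL m0 V hnd hok ha hb
    have hiff : (r > x + d.1 ∧ x + d.1 ≥ 0 ∧ c > y + d.2 ∧ y + d.2 ≥ 0 ∧
        pvGet (zeroL V m0) (x + d.1) (y + d.2) > 0) ↔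
        (posC m0 r c (x + d.1, y + d.2) ∧ (x + d.1, y + d.2) ∉ V) := by
      constructor
      · rintro ⟨h1, h2, h3, h4, h5⟩
        rw [hget h2 h4] at h5
        by_cases hm : (x + d.1, y + d.2) ∈ V
        · rw [if_pos hm] at h5; omega
        · rw [if_neg hm] at h5; exact ⟨⟨h1, h2, h3, h4, h5⟩, hm⟩
      · rintro ⟨⟨h1, h2, h3, h4, h5⟩, hm⟩
        refine ⟨h1, h2, h3, h4, ?_⟩
        rw [hget h2 h4, if_neg hm]; exact h5
    rw [List.foldl_cons]
    by_cases hC : posC m0 r c (x + d.1, y + d.2) ∧ (x + d.1, y + d.2) ∉ V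
    · have hq := hC.1
      have hqv := hC.2
      have hstep : stepA r c x y (zeroL V m0, st, t) d =
          (zeroL (V ++ [(x + d.1, y + d.2)]) m0, (x + d.1, y + d.2) :: st,
            t + pvGet m0 (x + d.1) (y + d.2)) := by
        rw [stepA, if_pos (hiff.mpr hC)]
        rw [zeroL_append, zeroL_cons, zeroL_nil, hget hq.2.1 hq.2.2.2.1, if_neg hqv]
      rw [hstep]
      have hnd' : (V ++ [(x + d.1, y + d.2)]).Nodup := by
        simp only [List.nodup_append, List.nodup_singleton, true_and]
        refine ⟨hnd, ?_⟩
        intro a h1 b hb heq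
        rw [List.mem_singleton] at hb
        subst heq; subst hb
        exact hqv h1
      have hV' : ∀ p ∈ V ++ [(x + d.1, y + d.2)], posC m0 r c p ∧ ReachC m0 r c s p := by
        intro p hp
        rcases List.mem_append.mp hp with h | h
        · exact hV p h
        · rw [List.mem_singleton] at h
          subst h
          exact ⟨hq, ReachC.step d (hV _ hx0).2 (hD d List.mem_cons_self) hq⟩
      obtain ⟨ns', heq, hnd2, hns2, hmem2⟩ :=
        ih (fun e he => hD e (List.mem_cons_of_mem _ he))
          (V ++ [(x + d.1, y + d.2)]) ((x + d.1, y + d.2) :: st)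
          (t + pvGet m0 (x + d.1) (y + d.2)) hnd' hV'
          (List.mem_append.mpr (Or.inl hx0))
      refine ⟨(x + d.1, y + d.2) :: ns', ?_, ?_, ?_, ?_⟩
      · rw [heq]
        have e1 : V ++ [(x + d.1, y + d.2)] ++ ns' = V ++ ((x + d.1, y + d.2) :: ns') := by
          simp
        rw [e1]
        have e2 : ns'.reverse ++ ((x + d.1, y + d.2) :: st)
            = ((x + d.1, y + d.2) :: ns').reverse ++ st := by simp
        rw [e2]
        have e3 : t + pvGet m0 (x + d.1) (y + d.2) +
            (ns'.map (fun p => pvGet m0 p.1 p.2)).sum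
            = t + (((x + d.1, y + d.2) :: ns').map (fun p => pvGet m0 p.1 p.2)).sum := by
          simp; ring
        rw [e3]
      · have e1 : V ++ [(x + d.1, y + d.2)] ++ ns' = V ++ ((x + d.1, y + d.2) :: ns') := by
          simp
        rw [← e1]; exact hnd2
      · intro p hp
        rcases List.mem_cons.mp hp with h | h
        · subst h
          exact ⟨hq, ReachC.step d (hV _ hx0).2 (hD d List.mem_cons_self) hq⟩
        · exact hns2 p h
      · intro p
        have e1 : V ++ [(x + d.1, y + d.2)] ++ ns' = V ++ ((x + d.1, y + d.2) :: ns') := by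
          simp
        rw [← e1, hmem2 p]
        simp only [List.mem_append, List.mem_cons]
        constructor
        · rintro (⟨h | h | h⟩ | ⟨e, he, h1, h2⟩)
          · exact Or.inl h
          · exact Or.inr ⟨d, Or.inl rfl, h, by rw [h]; exact hq⟩
          · exact absurd h (List.not_mem_nil)
          · exact Or.inr ⟨e, Or.inr he, h1, h2⟩
        · rintro (h | ⟨e, he | he, h1, h2⟩)
          · exact Or.inl (Or.inl h)
          · subst he; subst h1; exact Or.inl (Or.inr (Or.inl rfl))
          · exact Or.inr ⟨e, he, h1, h2⟩
    · have hstep : stepA r c x y (zeroL V m0, st, t) d = (zeroL V m0, st, t) := by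
        rw [stepA, if_neg (fun hc => hC (hiff.mp hc))]
      rw [hstep]
      obtain ⟨ns', heq, hnd2, hns2, hmem2⟩ :=
        ih (fun e he => hD e (List.mem_cons_of_mem _ he)) V st t hnd hV hx0
      refine ⟨ns', heq, hnd2, hns2, ?_⟩
      intro p
      rw [hmem2 p]
      constructor
      · rintro (h | ⟨e, he, h1, h2⟩)
        · exact Or.inl h
        · exact Or.inr ⟨e, List.mem_cons_of_mem _ he, h1, h2⟩
      · rintro (h | ⟨e, he, h1, h2⟩)
        · exact Or.inl h
        · rcases List.mem_cons.mp he with he' | he'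
          · subst he'
            subst h1
            rcases not_and_or.mp hC with hc | hc
            · exact absurd h2 hc
            · exact Or.inl (not_not.mp hc)
          · exact Or.inr ⟨e, he', h1, h2⟩

theorem loopA_spec (m0 : List (List Int)) (r c : Int) (s : Int × Int) :
    ∀ (f : Nat) (V st : List (Int × Int)) (t : Int),
    V.Nodup →
    (∀ p ∈ V, posC m0 r c p ∧ ReachC m0 r c s p) →
    (∀ p ∈ st, p ∈ V) →
    (∀ p ∈ V, p ∉ st → ∀ d ∈ pvDirects, posC m0 r c (p.1 + d.1, p.2 + d.2) →
      (p.1 + d.1, p.2 + d.2) ∈ V) →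
    2 * posN (zeroL V m0) + st.length ≤ f →
    ∃ W : List (Int × Int), W.Nodup ∧
      (∀ p ∈ W, posC m0 r c p ∧ ReachC m0 r c s p) ∧
      (∀ p ∈ V, p ∈ W) ∧
      (∀ p ∈ W, ∀ d ∈ pvDirects, posC m0 r c (p.1 + d.1, p.2 + d.2) →
        (p.1 + d.1, p.2 + d.2) ∈ W) ∧
      dfsALoop f (zeroL V m0) st t r c
        = (t + (sumA (zeroL V m0) - sumA (zeroL W m0)), zeroL W m0) := by
  intro f
  induction f with
  | zero =>
    intro V st t hnd hV hst hcl hf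
    have hstnil : st = [] := List.length_eq_zero_iff.mp (by omega)
    subst hstnil
    refine ⟨V, hnd, hV, fun p hp => hp, fun p hp hd => hcl p hp (List.not_mem_nil) hd, ?_⟩
    simp [dfsALoop]
  | succ f ih =>
    intro V st t hnd hV hst hcl hf
    cases st with
    | nil =>
      refine ⟨V, hnd, hV, fun p hp => hp, fun p hp hd => hcl p hp (List.not_mem_nil) hd, ?_⟩
      simp [dfsALoop]
    | cons hd0 rest =>
      obtain ⟨x, y⟩ := hd0
      have hx0 : (x, y) ∈ V := hst _ List.mem_cons_self
      obtain ⟨ns, heq, hnd2, hns2, hmem2⟩ :=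
        expandA_spec m0 r c s x y pvDirects (fun d hd => hd) V rest t hnd hV hx0
      rw [dfsALoop_cons, heq]
      dsimp only
      have hV' : ∀ p ∈ V ++ ns, posC m0 r c p ∧ ReachC m0 r c s p := by
        intro p hp
        rcases List.mem_append.mp hp with h | h
        · exact hV p h
        · exact hns2 p h
      have hst' : ∀ p ∈ ns.reverse ++ rest, p ∈ V ++ ns := by
        intro p hp
        rcases List.mem_append.mp hp with h | h
        · exact List.mem_append.mpr (Or.inr (List.mem_reverse.mp h))
        · exact List.mem_append.mpr (Or.inl (hst p (List.mem_cons_of_mem _ h)))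
      have hcl' : ∀ p ∈ V ++ ns, p ∉ ns.reverse ++ rest → ∀ d ∈ pvDirects,
          posC m0 r c (p.1 + d.1, p.2 + d.2) → (p.1 + d.1, p.2 + d.2) ∈ V ++ ns := by
        intro p hp hnotin d hd hposd
        rcases List.mem_append.mp hp with h | h
        · by_cases hpx : p = (x, y)
          · subst hpx
            exact (hmem2 _).mpr (Or.inr ⟨d, hd, rfl, hposd⟩)
          · have hprest : p ∉ rest := fun hc => hnotin (List.mem_append.mpr (Or.inr hc))
            have : p ∉ (x, y) :: rest := by
              intro hc
              rcases List.mem_cons.mp hc with hc | hc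
              · exact hpx hc
              · exact hprest hc
            exact List.mem_append.mpr (Or.inl (hcl p h this d hd hposd))
        · exact absurd (List.mem_append.mpr (Or.inl (List.mem_reverse.mpr h))) hnotin
      have e1 := posN_zeroL m0 V hnd (okCells_of_pos (fun p hp => (hV p hp).1))
      have e2 := posN_zeroL m0 (V ++ ns) hnd2 (okCells_of_pos (fun p hp => (hV' p hp).1))
      have hf' : 2 * posN (zeroL (V ++ ns) m0) + (ns.reverse ++ rest).length ≤ f := by
        simp only [List.length_append, List.length_reverse, List.length_cons] at *
        omega
      obtain ⟨W, hWnd, hWp, hVW, hWcl, hWeq⟩ :=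
        ih (V ++ ns) (ns.reverse ++ rest) (t + (ns.map (fun p => pvGet m0 p.1 p.2)).sum)
          hnd2 hV' hst' hcl' hf'
      refine ⟨W, hWnd, hWp, fun p hp => hVW p (List.mem_append.mpr (Or.inl hp)), hWcl, ?_⟩
      rw [hWeq]
      have sV := sumA_zeroL m0 V hnd (okCells_of_pos (fun p hp => (hV p hp).1))
      have sV' := sumA_zeroL m0 (V ++ ns) hnd2 (okCells_of_pos (fun p hp => (hV' p hp).1))
      have hsum : (List.map (fun p => pvGet m0 p.1 p.2) (V ++ ns)).sum
          = (List.map (fun p => pvGet m0 p.1 p.2) V).sum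
            + (List.map (fun p => pvGet m0 p.1 p.2) ns).sum := by
        rw [List.map_append, List.sum_append]
      have : t + (List.map (fun p => pvGet m0 p.1 p.2) ns).sum
          + (sumA (zeroL (V ++ ns) m0) - sumA (zeroL W m0))
          = t + (sumA (zeroL V m0) - sumA (zeroL W m0)) := by
        rw [sV, sV', hsum]; ring
      rw [this]

theorem dfsA_spec (m : List (List Int)) (r c i j : Int) (h : posC m r c (i, j)) :
    ∃ W : List (Int × Int), W.Nodup ∧
      (∀ p, p ∈ W ↔ ReachC m r c (i, j) p) ∧
      dfsA m i j r c = ((W.map (fun p => pvGet m p.1 p.2)).sum, zeroL W m) := by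
  have hzV : pvSet0 m i j = zeroL [(i, j)] m := rfl
  have hnd : ([(i, j)] : List (Int × Int)).Nodup := List.nodup_singleton _
  have hV : ∀ p ∈ [(i, j)], posC m r c p ∧ ReachC m r c (i, j) p := by
    intro p hp
    rw [List.mem_singleton] at hp
    subst hp
    exact ⟨h, ReachC.refl⟩
  have hfuel : 2 * posN (zeroL [(i, j)] m) + [(i, j)].length ≤ 2 * pvCells m + 2 := by
    have h1 : posN (zeroL [(i, j)] m) ≤ posN m := by
      rw [← hzV]; exact posN_pvSet0_le m i j
    have h2 := posN_le_cells m
    simp only [List.length_cons, List.length_nil]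
    omega
  obtain ⟨W, hWnd, hWp, hVW, hWcl, hWeq⟩ :=
    loopA_spec m (r := r) (c := c) ((i, j)) (2 * pvCells m + 2) [(i, j)] [(i, j)]
      (pvGet m i j) hnd hV (fun p hp => hp) (fun p hp hnp => absurd hp hnp) hfuel
  refine ⟨W, hWnd, ?_, ?_⟩
  · intro p
    constructor
    · exact fun hp => (hWp p hp).2
    · exact reach_sub W (hVW _ List.mem_cons_self) hWcl p
  · show dfsALoop (2 * pvCells m + 2) (pvSet0 m i j) [(i, j)] (pvGet m i j) r c = _
    rw [hzV, hWeq]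
    have sV : sumA (zeroL [(i, j)] m) = sumA m - pvGet m i j := by
      rw [← hzV]; exact sumA_pvSet0 m h.2.1 h.2.2.2.1
    have sW := sumA_zeroL m W hWnd (okCells_of_pos (fun p hp => (hWp p hp).1))
    have : pvGet m i j + (sumA (zeroL [(i, j)] m) - sumA (zeroL W m))
        = (W.map (fun p => pvGet m p.1 p.2)).sum := by
      rw [sV, sW]; ring
    rw [this]

-- ---- B side: the frontier loop ----

theorem mem_foldlAdd (l : List (Int × Int)) (s : PySem.Set (Int × Int)) (q : Int × Int) :
    q ∈ l.foldl (fun c p => PySem.Set.add c p) s ↔ q ∈ s ∨ q ∈ l := by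
  induction l generalizing s with
  | nil => simp
  | cons p l ih =>
    rw [List.foldl_cons, ih, PySem.Set.mem_add]
    simp only [List.mem_cons]
    tauto

theorem nodup_foldlAdd (l : List (Int × Int)) (s : PySem.Set (Int × Int))
    (h : s.Nodup) : (l.foldl (fun c p => PySem.Set.add c p) s).Nodup := by
  induction l generalizing s with
  | nil => exact h
  | cons p l ih => exact ih _ (PySem.Set.nodup_add _ _ h)

theorem compLoop_nil_frontier (f : Nat) (m : List (List Int)) (r c : Int)
    (comp : PySem.Set (Int × Int)) : compLoop f m r c comp [] = comp := by
  cases f <;> simp [compLoop]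

theorem mem_newFrontier (m : List (List Int)) (r c : Int)
    (comp frontier : List (Int × Int)) (q : Int × Int) :
    (q ∈ PySem.Set.ofList (frontier.flatMap (fun p =>
      pvDirects.filterMap (fun d =>
        let nx := p.1 + d.1
        let ny := p.2 + d.2
        if 0 ≤ nx ∧ nx < r ∧ 0 ≤ ny ∧ ny < c ∧ 0 < pvGet m nx ny ∧
            (nx, ny) ∉ comp then
          some (nx, ny)
        else none)))) ↔
    ∃ p ∈ frontier, ∃ d ∈ pvDirects,
      q = (p.1 + d.1, p.2 + d.2) ∧ posC m r c q ∧ q ∉ comp := by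
  rw [PySem.Set.mem_ofList, List.mem_flatMap]
  constructor
  · rintro ⟨p, hp, hq⟩
    rw [List.mem_filterMap] at hq
    obtain ⟨d, hd, hsome⟩ := hq
    dsimp only at hsome
    split_ifs at hsome with hcond
    · obtain ⟨h1, h2, h3, h4, h5, h6⟩ := hcond
      obtain rfl := Option.some.inj hsome
      exact ⟨p, hp, d, hd, rfl, ⟨h2, h1, h4, h3, h5⟩, h6⟩
  · rintro ⟨p, hp, d, hd, rfl, ⟨h1, h2, h3, h4, h5⟩, h6⟩
    refine ⟨p, hp, ?_⟩
    rw [List.mem_filterMap]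
    exact ⟨d, hd, by dsimp only; rw [if_pos ⟨h2, h1, h4, h3, h5, h6⟩]⟩

theorem compLoop_spec (m : List (List Int)) (r c : Int) (s : Int × Int) :
    ∀ (f : Nat) (comp frontier : PySem.Set (Int × Int)),
    comp.Nodup →
    (∀ p ∈ frontier, p ∈ comp) →
    (∀ p ∈ comp, posC m r c p ∧ ReachC m r c s p) →
    (∀ p ∈ comp, p ∉ frontier → ∀ d ∈ pvDirects, posC m r c (p.1 + d.1, p.2 + d.2) →
      (p.1 + d.1, p.2 + d.2) ∈ comp) →
    posN m + 2 ≤ f + comp.length →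
    ∃ W : List (Int × Int), compLoop f m r c comp frontier = W ∧ W.Nodup ∧
      (∀ p ∈ comp, p ∈ W) ∧
      (∀ p ∈ W, posC m r c p ∧ ReachC m r c s p) ∧
      (∀ p ∈ W, ∀ d ∈ pvDirects, posC m r c (p.1 + d.1, p.2 + d.2) →
        (p.1 + d.1, p.2 + d.2) ∈ W) := by
  intro f
  induction f with
  | zero =>
    intro comp frontier hnd _ hcomp _ hf
    have := length_le_posN m comp hnd (okCells_of_pos (fun p hp => (hcomp p hp).1))
    omega
  | succ f ih =>
    intro comp frontier hnd hfr hcomp hcl hf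
    by_cases hfe : frontier = []
    · subst hfe
      rw [compLoop_nil_frontier]
      exact ⟨comp, rfl, hnd, fun p hp => hp, hcomp,
        fun p hp => hcl p hp (List.not_mem_nil)⟩
    · rw [show compLoop (f + 1) m r c comp frontier
          = compLoop f m r c
              ((PySem.Set.ofList (frontier.flatMap (fun p =>
                pvDirects.filterMap (fun d =>
                  let nx := p.1 + d.1
                  let ny := p.2 + d.2
                  if 0 ≤ nx ∧ nx < r ∧ 0 ≤ ny ∧ ny < c ∧ 0 < pvGet m nx ny ∧
                      (nx, ny) ∉ comp then
                    some (nx, ny)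
                  else none)))).foldl (fun c p => PySem.Set.add c p) comp)
              (PySem.Set.ofList (frontier.flatMap (fun p =>
                pvDirects.filterMap (fun d =>
                  let nx := p.1 + d.1
                  let ny := p.2 + d.2
                  if 0 ≤ nx ∧ nx < r ∧ 0 ≤ ny ∧ ny < c ∧ 0 < pvGet m nx ny ∧
                      (nx, ny) ∉ comp then
                    some (nx, ny)
                  else none))))
          from by
            rw [compLoop]
            rw [if_neg (by simp [List.isEmpty_iff, hfe])]]
      generalize hFR : (PySem.Set.ofList (frontier.flatMap (fun p =>
        pvDirects.filterMap (fun d =>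
          let nx := p.1 + d.1
          let ny := p.2 + d.2
          if 0 ≤ nx ∧ nx < r ∧ 0 ≤ ny ∧ ny < c ∧ 0 < pvGet m nx ny ∧
              (nx, ny) ∉ comp then
            some (nx, ny)
          else none)))) = FR
      have hmemFR : ∀ q, q ∈ FR ↔ ∃ p ∈ frontier, ∃ d ∈ pvDirects,
          q = (p.1 + d.1, p.2 + d.2) ∧ posC m r c q ∧ q ∉ comp := fun q => by
        rw [← hFR]; exact mem_newFrontier m r c comp frontier q
      have hndFR : FR.Nodup := by rw [← hFR]; exact PySem.Set.nodup_ofList _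
      have hmemCP : ∀ q, q ∈ FR.foldl (fun c p => PySem.Set.add c p) comp ↔
          q ∈ comp ∨ q ∈ FR := mem_foldlAdd FR comp
      have hndCP : (FR.foldl (fun c p => PySem.Set.add c p) comp).Nodup :=
        nodup_foldlAdd FR comp hnd
      have hsubCP : ∀ p ∈ FR, p ∈ FR.foldl (fun c p => PySem.Set.add c p) comp :=
        fun p hp => (hmemCP p).mpr (Or.inr hp)
      have hcompCP : ∀ p ∈ FR.foldl (fun c p => PySem.Set.add c p) comp,
          posC m r c p ∧ ReachC m r c s p := by
        intro p hp
        rcases (hmemCP p).mp hp with h | h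
        · exact hcomp p h
        · obtain ⟨p', hp', d, hd, rfl, hpos, _⟩ := (hmemFR p).mp h
          exact ⟨hpos, ReachC.step d (hcomp p' (hfr p' hp')).2 hd hpos⟩
      have hclCP : ∀ p ∈ FR.foldl (fun c p => PySem.Set.add c p) comp, p ∉ FR →
          ∀ d ∈ pvDirects, posC m r c (p.1 + d.1, p.2 + d.2) →
            (p.1 + d.1, p.2 + d.2) ∈ FR.foldl (fun c p => PySem.Set.add c p) comp := by
        intro p hp hpFR d hd hpos
        rcases (hmemCP p).mp hp with h | h
        · by_cases hpf : p ∈ frontier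
          · by_cases hqc : (p.1 + d.1, p.2 + d.2) ∈ comp
            · exact (hmemCP _).mpr (Or.inl hqc)
            · exact (hmemCP _).mpr (Or.inr ((hmemFR _).mpr ⟨p, hpf, d, hd, rfl, hpos, hqc⟩))
          · exact (hmemCP _).mpr (Or.inl (hcl p h hpf d hd hpos))
        · exact absurd h hpFR
      by_cases hFRnil : FR = []
      · subst hFRnil
        rw [show ([] : PySem.Set (Int × Int)).foldl (fun c p => PySem.Set.add c p) comp
            = comp from rfl]
        rw [compLoop_nil_frontier]
        refine ⟨comp, rfl, hnd, fun p hp => hp, hcomp, ?_⟩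
        intro p hp d hd hpos
        by_cases hpf : p ∈ frontier
        · by_cases hqc : (p.1 + d.1, p.2 + d.2) ∈ comp
          · exact hqc
          · exact absurd ((hmemFR _).mpr ⟨p, hpf, d, hd, rfl, hpos, hqc⟩)
              (List.not_mem_nil)
        · exact hcl p hp hpf d hd hpos
      · obtain ⟨q0, hq0⟩ := List.exists_mem_of_ne_nil FR hFRnil
        have hq0c : q0 ∉ comp := by
          obtain ⟨_, _, _, _, _, _, h⟩ := (hmemFR q0).mp hq0
          exact h
        have hlen : comp.length + 1 ≤ (FR.foldl (fun c p => PySem.Set.add c p) comp).length := by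
          have hsub : (q0 :: comp) ⊆ FR.foldl (fun c p => PySem.Set.add c p) comp := by
            intro a ha
            rcases List.mem_cons.mp ha with h | h
            · exact h ▸ (hmemCP q0).mpr (Or.inr hq0)
            · exact (hmemCP a).mpr (Or.inl h)
          have := (List.subperm_of_subset (by simp [List.nodup_cons, hq0c, hnd]) hsub).length_le
          simpa using this
        have hf' : posN m + 2 ≤ f + (FR.foldl (fun c p => PySem.Set.add c p) comp).length := by
          omega
        obtain ⟨W, hWeq, hWnd, hWsub, hWp, hWcl⟩ :=
          ih (FR.foldl (fun c p => PySem.Set.add c p) comp) FR hndCP hsubCP hcompCP hclCP hf'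
        exact ⟨W, hWeq, hWnd,
          fun p hp => hWsub p ((hmemCP p).mpr (Or.inl hp)), hWp, hWcl⟩

theorem componentB_spec (m : List (List Int)) (r c i j : Int) (h : posC m r c (i, j)) :
    ∃ W : List (Int × Int), componentB m i j r c = W ∧ W.Nodup ∧
      (∀ p, p ∈ W ↔ ReachC m r c (i, j) p) := by
  have hof : PySem.Set.ofList [((i : Int), (j : Int))] = [(i, j)] :=
    PySem.Set.ofList_eq_self_of_nodup _ (List.nodup_singleton _)
  have hV : ∀ p ∈ [((i : Int), (j : Int))], posC m r c p ∧ ReachC m r c (i, j) p := by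
    intro p hp
    rw [List.mem_singleton] at hp
    subst hp
    exact ⟨h, ReachC.refl⟩
  have hfuel : posN m + 2 ≤ (pvCells m + 2) + ([((i : Int), (j : Int))] : List (Int × Int)).length := by
    have := posN_le_cells m
    simp only [List.length_cons, List.length_nil]
    omega
  obtain ⟨W, hWeq, hWnd, hWsub, hWp, hWcl⟩ :=
    compLoop_spec m r c (i, j) (pvCells m + 2) [(i, j)] [(i, j)]
      (List.nodup_singleton _) (fun p hp => hp) hV
      (fun p hp hnp => absurd hp hnp) hfuel
  refine ⟨W, ?_, hWnd, ?_⟩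
  · show compLoop (pvCells m + 2) m r c (PySem.Set.ofList [(i, j)])
        (PySem.Set.ofList [(i, j)]) = W
    rw [hof]
    exact hWeq
  · intro p
    constructor
    · exact fun hp => (hWp p hp).2
    · exact reach_sub W (hWsub _ List.mem_cons_self) hWcl p

theorem branch_eq (m : List (List Int)) (r c i j : Int) (h : posC m r c (i, j)) :
    dfsA m i j r c
      = (((componentB m i j r c).map (fun p => pvGet m p.1 p.2)).sum,
         (componentB m i j r c).foldl (fun mm p => pvSet0 mm p.1 p.2) m) := by
  obtain ⟨WA, hAnd, hAmem, hAeq⟩ := dfsA_spec m r c i j h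
  obtain ⟨WB, hBeq, hBnd, hBmem⟩ := componentB_spec m r c i j h
  have hperm : WA.Perm WB :=
    (List.perm_ext_iff_of_nodup hAnd hBnd).mpr (fun a => by rw [hAmem, hBmem])
  rw [hAeq, hBeq]
  refine Prod.ext ?_ ?_
  · exact (hperm.map (fun p => pvGet m p.1 p.2)).sum_eq
  · show zeroL WA m = WB.foldl (fun mm p => pvSet0 mm p.1 p.2) m
    exact zeroL_perm hperm m

theorem result_eq_alt (matrix : List (List Int)) : result matrix = result_alt matrix := by
  unfold result result_alt
  by_cases h0 : (matrix.length : Int) = 0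
  · rw [if_pos h0, if_pos h0]
  · rw [if_neg h0, if_neg h0]
    dsimp only
    congr 1
    apply PySem.List.foldl_congr_mem
    intro acc i hi
    apply PySem.List.foldl_congr_mem
    intro acc2 j hj
    obtain ⟨hi0, hi1⟩ := PySem.List.mem_pyRange_one.mp hi
    obtain ⟨hj0, hj1⟩ := PySem.List.mem_pyRange_one.mp hj
    by_cases hg : pvGet acc2.2 i j > 0
    · rw [if_pos hg, if_pos hg]
      have hpos : posC acc2.2 (matrix.length : Int)
          (((PySem.List.pyGet? matrix 0).getD []).length : Int) (i, j) :=
        ⟨hi1, hi0, hj1, hj0, hg⟩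
      rw [branch_eq acc2.2 _ _ i j hpos]
    · rw [if_neg hg, if_neg hg]

-- ===== VERDICT (by name: the statement is the Claim_ definition above) =====
theorem result_spec : Claim_equal_result := by
  intro matrix _ _
  unfold Spec_result
  exact result_eq_alt matrix
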